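-- pv_equiv track=rewrite | github.com/yannickperrenet/hackerrank | algorithms/implementation/the_grid_search.py | is_seq_in_grid
-- ===== SOURCE A (Python) =====
-- def get_occurrences(seq, string):
--     """Return a list indeces on which the sequence starts."""
--     n = len(seq)
--     return [i for i, v in enumerate(string) if string[i:i+n] == seq]
--
-- def is_seq_in_grid(seq, grid):
--     for i, row in enumerate(grid):
--         # Get possible starting positions for the sequence.
--         start_positions = get_occurrences(seq[0], row)
--
--         # For each occurence of the first string of the seq, check each
--         # subsequent row whether it holds the next string of the seq
--         # starting at the same position as the first string.
--         for sp in start_positions: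
--             for j in range(1, len(seq)):
--                 if grid[i+j][sp:sp + len(seq[0])] != seq[j]:
--                     break
--             else:
--                 return True
--
--         # When the sequence would fit in the grid anymore, break.
--         if i == len(grid) - len(seq):
--             break
--
--     return False
-- ===== SOURCE B (Python) =====
-- def is_seq_in_grid(seq, grid):
--     # Candidate-filtering: keep the set of viable start columns per window and
--     # narrow it row by row, instead of re-scanning rows per candidate.
--     r, n = len(seq), len(seq[0])
--     if r > len(grid):
--         return False
--     for i in range(len(grid) - r + 1):
--         row = grid[i]
--         cols = [sp for sp in range(len(row)) if row[sp:sp + n] == seq[0]]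
--         for j in range(1, r):
--             if not cols:
--                 break
--             nxt = grid[i + j]
--             cols = [sp for sp in cols if nxt[sp:sp + n] == seq[j]]
--         if cols:
--             return True
--     return False
-- ===== Notes on version B (the rewrite author's own statement) =====
-- stated objective: alternative
-- what changed: Instead of A's per-candidate rescan (for each occurrence of seq[0] in a row, walk the rows below it), B keeps one list of still-viable start columns per window and narrows it row by row with a filter, stopping early when it empties; the window loop is an explicit range over valid start rows rather than A's enumerate-with-break.
-- outside the precondition, e.g. on is_seq_in_grid([], []): A returns False, B raises IndexError; on is_seq_in_grid(['a', 'b'], ['a']): A raises IndexError, B returns False; on is_seq_in_grid(['a', 'b'], ['x']): A returns False, B returns False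
import Mathlib
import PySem

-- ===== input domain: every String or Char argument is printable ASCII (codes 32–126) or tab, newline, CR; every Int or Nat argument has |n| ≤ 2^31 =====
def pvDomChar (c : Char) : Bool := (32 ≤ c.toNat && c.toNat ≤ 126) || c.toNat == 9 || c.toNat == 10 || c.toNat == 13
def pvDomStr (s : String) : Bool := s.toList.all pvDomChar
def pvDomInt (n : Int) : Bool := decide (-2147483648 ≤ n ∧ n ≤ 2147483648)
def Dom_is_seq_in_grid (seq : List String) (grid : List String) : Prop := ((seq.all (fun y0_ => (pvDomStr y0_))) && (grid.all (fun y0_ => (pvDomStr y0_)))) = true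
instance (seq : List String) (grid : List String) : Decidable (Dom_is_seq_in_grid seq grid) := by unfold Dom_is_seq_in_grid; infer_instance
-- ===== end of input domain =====

-- B replaces A's per-candidate column re-scan by row-by-row filtering of one viable-column set
-- per window (objective: alternative traversal, same worst-case cost).

-- ===== PORT A =====
-- row[sp:sp+n] == pat  (Python string slice comparison, nonnegative bounds)
def pvSliceEq (row : String) (sp n : Nat) (pat : String) : Bool :=
  PySem.List.slice row.toList (some (sp : Int)) (some ((sp : Int) + (n : Int))) == pat.toList

-- [i for i, v in enumerate(string) if string[i:i+n] == seq]
def get_occurrences (pat : String) (s : String) : List Nat :=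
  let n := pat.toList.length
  (List.range s.toList.length).filter (fun i => pvSliceEq s i n pat)

-- inner 'for j in range(1, len(seq)) … else: return True' of A: all rows below match
def pvInnerA (seq : List String) (grid : List String) (n : Nat) (i : Int) (sp : Nat) : Bool :=
  (List.range' 1 (seq.length - 1)).all
    (fun j => pvSliceEq (PySem.List.pyGetD grid (i + (j : Int)) "") sp n (seq.getD j ""))

-- the 'for i, row in enumerate(grid)' loop with its early return and break
def pvALoop (seq : List String) (grid : List String) : List (Int × String) → Bool
  | [] => false
  | (i, row) :: rest =>
    let sps := get_occurrences (seq.getD 0 "") row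
    if sps.any (fun sp => pvInnerA seq grid (seq.getD 0 "").toList.length i sp) then true
    else if i = (grid.length : Int) - (seq.length : Int) then false
    else pvALoop seq grid rest

def is_seq_in_grid (seq : List String) (grid : List String) : Bool :=
  pvALoop seq grid (PySem.List.enumerate grid 0)

-- ===== PORT B =====
-- 'for j in range(1, r): if not cols: break; cols = [sp for sp in cols if …]'
def pvFilterB (seq : List String) (grid : List String) (n : Nat) (i : Nat) :
    List Nat → List Nat → List Nat
  | [], cols => cols
  | j :: js, cols =>
    if cols.isEmpty then cols
    else pvFilterB seq grid n i js
      (cols.filter (fun sp =>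
        pvSliceEq (PySem.List.pyGetD grid ((i : Int) + (j : Int)) "") sp n (seq.getD j "")))

-- 'for i in range(len(grid) - r + 1): …'
def pvOuterB (seq : List String) (grid : List String) (n : Nat) : List Nat → Bool
  | [] => false
  | i :: rest =>
    let row := PySem.List.pyGetD grid (i : Int) ""
    let cols0 := (List.range row.toList.length).filter (fun sp => pvSliceEq row sp n (seq.getD 0 ""))
    let cols := pvFilterB seq grid n i (List.range' 1 (seq.length - 1)) cols0
    if cols.isEmpty then pvOuterB seq grid n rest else true

def is_seq_in_grid_alt (seq : List String) (grid : List String) : Bool :=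
  if seq.length > grid.length then false
  else pvOuterB seq grid (seq.getD 0 "").toList.length (List.range (grid.length - seq.length + 1))

-- ===== PRECONDITION & SPEC =====
-- Pre_ excludes empty seq (A raises IndexError on seq[0] unless grid is empty, where its loop
-- never runs and it returns False while B still raises) and seq taller than grid: in that
-- region A raises IndexError whenever a partial match reaches past the bottom row and returns
-- False otherwise (B returns False on all of it), so the whole region is carved out.
def Pre_is_seq_in_grid (seq : List String) (grid : List String) : Prop :=
  seq ≠ [] ∧ seq.length ≤ grid.length
instance (seq : List String) (grid : List String) : Decidable (Pre_is_seq_in_grid seq grid) := by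
  unfold Pre_is_seq_in_grid; infer_instance

def pvWitness_is_seq_in_grid : List String × List String := (["ab"], ["xab", "cd"])

def Spec_is_seq_in_grid (seq : List String) (grid : List String) (out : Bool) : Prop :=
  out = is_seq_in_grid_alt seq grid
instance (seq : List String) (grid : List String) (out : Bool) :
    Decidable (Spec_is_seq_in_grid seq grid out) := by unfold Spec_is_seq_in_grid; infer_instance

-- ===== CLAIM (what is proved, stated in full; the proofs are below) =====
def Claim_equal_is_seq_in_grid : Prop := ∀ (seq : List String) (grid : List String), Dom_is_seq_in_grid seq grid → Pre_is_seq_in_grid seq grid → Spec_is_seq_in_grid seq grid (is_seq_in_grid seq grid)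

-- ===== LEMMAS AND PROOFS =====

-- the per-start-row check both programs decide, as one Bool
def pvRowAny (seq : List String) (grid : List String) (i : Int) : Bool :=
  let n := (seq.getD 0 "").toList.length
  let row := PySem.List.pyGetD grid i ""
  (List.range row.toList.length).any
    (fun sp => pvSliceEq row sp n (seq.getD 0 "") && pvInnerA seq grid n i sp)

theorem pv_isEmpty_filter {α : Type} (l : List α) (p : α → Bool) :
    (l.filter p).isEmpty = !(l.any p) := by
  induction l with
  | nil => rfl
  | cons x xs ih => by_cases h : p x <;> simp [h, ih]

theorem pv_filterB_eq (seq grid : List String) (n i : Nat) (js : List Nat) (cols : List Nat) :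
    pvFilterB seq grid n i js cols =
      cols.filter (fun sp => js.all
        (fun j => pvSliceEq (PySem.List.pyGetD grid ((i : Int) + (j : Int)) "") sp n (seq.getD j ""))) := by
  induction js generalizing cols with
  | nil => simp [pvFilterB]
  | cons j js ih =>
    by_cases hc : cols.isEmpty
    · have : cols = [] := by simpa using hc
      subst this; simp [pvFilterB]
    · rw [pvFilterB, if_neg hc, ih, List.filter_filter]
      apply List.filter_congr
      intro sp _
      simp [List.all_cons, Bool.and_comm]

theorem pv_arow (seq grid : List String) (i : Int) (row : String)
    (hrow : row = PySem.List.pyGetD grid i "") :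
    ((get_occurrences (seq.getD 0 "") row).any
        (fun sp => pvInnerA seq grid (seq.getD 0 "").toList.length i sp)) =
      pvRowAny seq grid i := by
  subst hrow
  unfold get_occurrences pvRowAny
  rw [List.any_filter]

theorem pv_brow (seq grid : List String) (i : Nat) :
    (pvFilterB seq grid (seq.getD 0 "").toList.length i (List.range' 1 (seq.length - 1))
        ((List.range (PySem.List.pyGetD grid (i : Int) "").toList.length).filter
          (fun sp => pvSliceEq (PySem.List.pyGetD grid (i : Int) "") sp
            (seq.getD 0 "").toList.length (seq.getD 0 "")))).isEmpty =
      !(pvRowAny seq grid (i : Int)) := by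
  rw [pv_filterB_eq, List.filter_filter, pv_isEmpty_filter]
  simp only [pvRowAny]
  congr 1
  rw [Bool.eq_iff_iff]
  simp only [List.any_eq_true, Bool.and_eq_true, pvInnerA]
  constructor
  · rintro ⟨sp, hm, h1, h2⟩; exact ⟨sp, hm, h2, h1⟩
  · rintro ⟨sp, hm, h1, h2⟩; exact ⟨sp, hm, h2, h1⟩

theorem pv_bouter (seq grid : List String) (idxs : List Nat) :
    pvOuterB seq grid (seq.getD 0 "").toList.length idxs =
      idxs.any (fun i => pvRowAny seq grid (i : Int)) := by
  induction idxs with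
  | nil => rfl
  | cons i rest ih =>
    show (if _ then _ else _) = _
    rw [pv_brow]
    cases h : pvRowAny seq grid (i : Int)
    · simp only [h, Bool.not_false, if_true, List.any_cons, Bool.false_or]
      exact ih
    · simp [h]

theorem pv_aloop (seq grid : List String) (hr : 1 ≤ seq.length) (hR : seq.length ≤ grid.length) :
    ∀ (d k : Nat), k + d = grid.length - seq.length →
      pvALoop seq grid (PySem.List.enumerate (grid.drop k) (k : Int)) =
        (List.range' k (d + 1)).any (fun i => pvRowAny seq grid (i : Int)) := by
  intro d
  induction d with
  | zero =>
    intro k hk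
    have hkR : k < grid.length := by omega
    rw [List.drop_eq_getElem_cons hkR, PySem.List.enumerate_cons]
    have hget : grid[k] = PySem.List.pyGetD grid (k : Int) "" := by
      rw [PySem.List.pyGetD_natCast]
      simp [List.getD, hkR]
    show (if _ then _ else _) = _
    rw [pv_arow seq grid (k : Int) _ hget]
    cases h : pvRowAny seq grid (k : Int)
    · rw [if_neg (by simp),
        if_pos (show (k : Int) = (grid.length : Int) - (seq.length : Int) by omega),
        List.range'_succ]
      simp [h]
    · rw [if_pos (by simp), List.range'_succ]
      simp [h]
  | succ d ih =>
    intro k hk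
    have hkR : k < grid.length := by omega
    rw [List.drop_eq_getElem_cons hkR, PySem.List.enumerate_cons]
    have hget : grid[k] = PySem.List.pyGetD grid (k : Int) "" := by
      rw [PySem.List.pyGetD_natCast]
      simp [List.getD, hkR]
    show (if _ then _ else _) = _
    rw [pv_arow seq grid (k : Int) _ hget]
    have hrec : PySem.List.enumerate (grid.drop (k + 1)) ((k : Int) + 1) =
        PySem.List.enumerate (grid.drop (k + 1)) (((k + 1 : Nat) : Int)) := by push_cast; ring_nf
    cases h : pvRowAny seq grid (k : Int)
    · have hne : ¬((k : Int) = (grid.length : Int) - (seq.length : Int)) := by omega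
      rw [if_neg (by simp), if_neg hne, hrec, ih (k + 1) (by omega),
        show List.range' k (d + 1 + 1) = k :: List.range' (k + 1) (d + 1) from List.range'_succ ..,
        List.any_cons, h, Bool.false_or]
    · rw [if_pos (by simp), List.range'_succ, List.any_cons, h, Bool.true_or]

-- ===== VERDICT (by name: the statement is the Claim_ definition above) =====
theorem is_seq_in_grid_spec : Claim_equal_is_seq_in_grid := by
  intro seq grid _dom pre
  obtain ⟨hne, hle⟩ := pre
  have hr : 1 ≤ seq.length := List.length_pos_iff.mpr hne
  unfold Spec_is_seq_in_grid is_seq_in_grid is_seq_in_grid_alt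
  rw [if_neg (by omega)]
  rw [pv_bouter, List.range_eq_range']
  have h0 : (PySem.List.enumerate grid 0) =
      PySem.List.enumerate (grid.drop 0) (((0 : Nat) : Int)) := by simp
  rw [h0, pv_aloop seq grid hr hle (grid.length - seq.length) 0 (by omega)]
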